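-- pv_equiv track=rewrite | github.com/yue-w/LeetCode | problems/2380. Time Needed to Rearrange a Binary String.py | secondsToRemoveOccurrences
-- ===== SOURCE A (Python) =====
-- def secondsToRemoveOccurrences(s: str) -> int:
--     satisfied = False
--     rst = 0
--     string = [char for char in s]
--     n = len(s)
--     while not satisfied:
--         satisfied = True
--         rst += 1
--         i = 0
--         while i < n:
--             if i + 1 < n and string[i] == '0' and string[i+1] == '1':
--                 satisfied = False
--                 string[i] = '1'
--                 string[i + 1] = '0'
--                 i += 2
--             else:
--                 i += 1
--
--     return rst - 1
-- ===== SOURCE B (Python) =====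
-- def secondsToRemoveOccurrences(s: str) -> int:
--     best = 0
--     ans = 0
--     zeros = 0
--     for c in s:
--         if c == '0':
--             zeros += 1
--         elif c == '1':
--             if zeros > 0:
--                 ans = max(ans + 1, zeros)
--         else:
--             best = max(best, ans)
--             ans = 0
--             zeros = 0
--     return max(best, ans)
-- ===== Notes on version B (the rewrite author's own statement) =====
-- stated objective: alternative
-- what changed: Replaces A's repeated simulate-until-fixpoint passes over a mutable char list by a single left-to-right fold that tracks (zeros seen, running answer) per maximal binary segment and takes the max over segments.
import Mathlib
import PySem

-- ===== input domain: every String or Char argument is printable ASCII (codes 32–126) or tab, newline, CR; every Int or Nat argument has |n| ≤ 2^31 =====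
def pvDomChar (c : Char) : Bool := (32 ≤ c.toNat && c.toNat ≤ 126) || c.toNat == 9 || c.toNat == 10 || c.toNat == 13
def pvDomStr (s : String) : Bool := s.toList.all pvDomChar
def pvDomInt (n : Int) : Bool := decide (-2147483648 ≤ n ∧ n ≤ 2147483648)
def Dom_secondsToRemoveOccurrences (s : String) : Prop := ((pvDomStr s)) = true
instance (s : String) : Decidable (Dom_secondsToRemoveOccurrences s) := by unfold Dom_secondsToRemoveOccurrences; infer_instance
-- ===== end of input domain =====

-- B replaces A's simulate-until-fixpoint passes by a single left-to-right fold
-- computing the round count per maximal binary segment; return values proved equal.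

-- ===== PORT A =====
-- A's inner while loop (scan, swap "01"->"10", skip 2) as structural recursion
-- over the char list; returns (new list, satisfied).
def innerA : List Char → List Char × Bool
  | [] => ([], true)
  | [c] => ([c], true)
  | c₁ :: c₂ :: t =>
    if c₁ = '0' ∧ c₂ = '1' then
      ('1' :: '0' :: (innerA t).1, false)
    else
      let r := innerA (c₂ :: t)
      (c₁ :: r.1, r.2)

-- termination measure for A's outer while loop: each '1' weighted by its index
def onesA : List Char → Nat
  | [] => 0
  | c :: t => (if c = '1' then 1 else 0) + onesA t

def muA : List Char → Nat
  | [] => 0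
  | _ :: t => onesA t + muA t

theorem onesA_cons (c : Char) (t : List Char) :
    onesA (c :: t) = (if c = '1' then 1 else 0) + onesA t := rfl

theorem muA_cons (c : Char) (t : List Char) : muA (c :: t) = onesA t + muA t := rfl

theorem onesA_innerA (l : List Char) : onesA (innerA l).1 = onesA l := by
  induction l using innerA.induct with
  | case1 => simp [innerA]
  | case2 c => simp [innerA]
  | case3 c₁ c₂ t h ih =>
    obtain ⟨rfl, rfl⟩ := h
    simp [innerA, onesA_cons, ih]
  | case4 c₁ c₂ t h ih =>
    simp only [innerA, if_neg h]
    simp only [onesA_cons, ih]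

theorem muA_innerA_le (l : List Char) : muA (innerA l).1 ≤ muA l := by
  induction l using innerA.induct with
  | case1 => simp [innerA]
  | case2 c => simp [innerA]
  | case3 c₁ c₂ t h ih =>
    obtain ⟨rfl, rfl⟩ := h
    have e1 := onesA_innerA t
    have e2 := ih
    simp [innerA, muA_cons, onesA_cons, e1]
    omega
  | case4 c₁ c₂ t h ih =>
    simp only [innerA, if_neg h]
    have e1 := onesA_innerA (c₂ :: t)
    have e3 := muA_cons c₂ t
    simp only [muA_cons, e1]
    omega

theorem muA_innerA_lt (l : List Char) (h2 : (innerA l).2 = false) :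
    muA (innerA l).1 < muA l := by
  induction l using innerA.induct with
  | case1 => simp [innerA] at h2
  | case2 c => simp [innerA] at h2
  | case3 c₁ c₂ t h ih =>
    obtain ⟨rfl, rfl⟩ := h
    have e1 := onesA_innerA t
    have e2 := muA_innerA_le t
    simp [innerA, muA_cons, onesA_cons, e1]
    omega
  | case4 c₁ c₂ t h ih =>
    simp only [innerA, if_neg h] at h2 ⊢
    have e0 := ih h2
    have e1 := onesA_innerA (c₂ :: t)
    have e3 := muA_cons c₂ t
    simp only [muA_cons, e1]
    omega

-- A's outer while loop: one pass per iteration, rst counts iterations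
def outerA (l : List Char) (rst : Int) : Int :=
  let r := innerA l
  let rst' := rst + 1
  if h : r.2 then rst' else outerA r.1 rst'
termination_by muA l
decreasing_by exact muA_innerA_lt l (by simpa using h)

def secondsToRemoveOccurrences (s : String) : Int :=
  outerA s.toList 0 - 1

-- ===== PORT B =====
-- B's loop body: state (best, ans, zeros)
def stepB (st : Int × Int × Int) (c : Char) : Int × Int × Int :=
  if c = '0' then (st.1, st.2.1, st.2.2 + 1)
  else if c = '1' then
    (if 0 < st.2.2 then (st.1, max (st.2.1 + 1) st.2.2, st.2.2) else st)
  else (max st.1 st.2.1, 0, 0)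

def secondsToRemoveOccurrences_alt (s : String) : Int :=
  let st := s.toList.foldl stepB (0, 0, 0)
  max st.1 st.2.1

-- ===== PRECONDITION & SPEC =====
def Spec_secondsToRemoveOccurrences (s : String) (out : Int) : Prop := out = secondsToRemoveOccurrences_alt s
instance (s : String) (out : Int) : Decidable (Spec_secondsToRemoveOccurrences s out) := by unfold Spec_secondsToRemoveOccurrences; infer_instance

-- ===== CLAIM (what is proved, stated in full; the proofs are below) =====
def Claim_equal_secondsToRemoveOccurrences : Prop := ∀ (s : String), Dom_secondsToRemoveOccurrences s → Spec_secondsToRemoveOccurrences s (secondsToRemoveOccurrences s)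

-- ===== LEMMAS AND PROOFS =====

-- "some '01' occurs" as a boolean scan
def has01 : List Char → Bool
  | c₁ :: c₂ :: t => (c₁ = '0' && c₂ = '1') || has01 (c₂ :: t)
  | _ => false

-- B's result from an arbitrary starting state
def resB (st : Int × Int × Int) (l : List Char) : Int :=
  let f := l.foldl stepB st
  max f.1 f.2.1

-- innerA reports satisfied iff no "01" occurs
theorem innerA_sat (l : List Char) : (innerA l).2 = !has01 l := by
  induction l using innerA.induct with
  | case1 => simp [innerA, has01]
  | case2 c => simp [innerA, has01]
  | case3 c₁ c₂ t h ih => simp [innerA, if_pos h, has01, h.1, h.2]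
  | case4 c₁ c₂ t h ih =>
    simp only [innerA, if_neg h, has01, ih]
    have : ¬(c₁ = '0' && c₂ = '1') := by
      intro hc; exact h ⟨by simpa using (Bool.and_elim_left hc), by simpa using (Bool.and_elim_right hc)⟩
    simp [Bool.or_eq_true] at *
    tauto

-- monotonicity: the final max never drops below the initial max
theorem resB_ge (l : List Char) : ∀ b a z : Int, max b a ≤ resB (b, a, z) l := by
  induction l with
  | nil => intro b a z; simp [resB]
  | cons c t ih =>
    intro b a z
    simp only [resB, List.foldl_cons] at *
    by_cases h0 : c = '0'
    · simpa [stepB, h0] using ih b a (z + 1)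
    · by_cases h1 : c = '1'
      · by_cases hz : 0 < z
        · have := ih b (max (a + 1) z) z
          simp only [stepB, h0, h1, if_neg, if_pos, hz] at *
          simp_all
          omega
        · simpa [stepB, h0, h1, hz] using ih b a z
      · have := ih (max b a) 0 0
        simp only [stepB, h0, h1] at *
        simp_all
        omega

-- if some "01" occurs, B's result is at least 1
theorem resB_pos (l : List Char) (h : has01 l = true) :
    ∀ b a z : Int, 0 ≤ a → 0 ≤ z → 1 ≤ resB (b, a, z) l := by
  induction l with
  | nil => simp [has01] at h
  | cons c t ih =>
    intro b a z ha hz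
    cases t with
    | nil => simp [has01] at h
    | cons c₂ t' =>
      have hh : (c = '0' ∧ c₂ = '1') ∨ has01 (c₂ :: t') = true := by
        simp only [has01, Bool.or_eq_true, Bool.and_eq_true, decide_eq_true_eq] at h
        tauto
      rcases hh with ⟨h0, h1⟩ | hrest
      · subst h0; subst h1
        have hz1 : (0:Int) < z + 1 := by omega
        have s1 : stepB (b, a, z) '0' = (b, a, z + 1) := by simp [stepB]
        have s2 : stepB (b, a, z + 1) '1' = (b, max (a + 1) (z + 1), z + 1) := by
          simp [stepB, hz1]
        have hge := resB_ge t' b (max (a + 1) (z + 1)) (z + 1)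
        simp only [resB, List.foldl_cons, s1, s2] at hge ⊢
        omega
      · simp only [resB, List.foldl_cons]
        by_cases h0 : c = '0'
        · have := ih (by simp [has01, hrest]) b a (z + 1) ha (by omega)
          simpa [resB, stepB, h0] using this
        · by_cases h1 : c = '1'
          · by_cases hzp : 0 < z
            · have := ih (by simp [has01, hrest]) b (max (a + 1) z) z (by omega) hz
              simpa [resB, stepB, h0, h1, hzp] using this
            · have := ih (by simp [has01, hrest]) b a z ha hz
              simpa [resB, stepB, h0, h1, hzp] using this
          · have := ih (by simp [has01, hrest]) (max b a) 0 0 le_rfl le_rfl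
            simpa [resB, stepB, h0, h1] using this

-- if no "01" occurs, B's result is 0 (state stays (0,0,·))
theorem resB_zero (l : List Char) (h : has01 l = false) :
    ∀ z : Int, (0 < z → l.head? ≠ some '1') → ∃ z', l.foldl stepB (0, 0, z) = (0, 0, z') := by
  induction l with
  | nil => intro z _; exact ⟨z, rfl⟩
  | cons c t ih =>
    intro z hhead
    have ht : has01 t = false := by
      cases t with
      | nil => simp [has01]
      | cons c₂ t' => simp only [has01, Bool.or_eq_false_iff] at h; exact h.2
    by_cases h0 : c = '0'
    · have hth : 0 < z + 1 → t.head? ≠ some '1' := by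
        intro _ hc
        cases t with
        | nil => simp at hc
        | cons d t' =>
          simp only [List.head?_cons, Option.some.injEq] at hc
          subst hc
          simp [has01, h0] at h
      have s1 : stepB (0, 0, z) c = (0, 0, z + 1) := by simp [stepB, h0]
      rw [List.foldl_cons, s1]
      exact ih ht (z + 1) hth
    · by_cases h1 : c = '1'
      · have hz : ¬ 0 < z := fun hzp => hhead hzp (by simp [h1])
        have s1 : stepB (0, 0, z) c = (0, 0, z) := by simp [stepB, h0, h1, hz]
        rw [List.foldl_cons, s1]
        exact ih ht z (fun hzp => absurd hzp hz)
      · have s1 : stepB (0, 0, z) c = (0, 0, 0) := by simp [stepB, h0, h1]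
        rw [List.foldl_cons, s1]
        exact ih ht 0 (by intro hzp; exact absurd hzp (by norm_num))

-- single non-swap character: B's transition commutes with decrementing (best, ans)
theorem step1 (c : Char) (b a z : Int) (hb : 0 ≤ b) (ha : 0 ≤ a) (hz : 0 ≤ z)
    (hinv : 0 < a → 0 < z) (hc : c = '1' → z ≤ a) :
    (0 ≤ (stepB (b, a, z) c).1 ∧ 0 ≤ (stepB (b, a, z) c).2.1 ∧
     0 ≤ (stepB (b, a, z) c).2.2 ∧
     (0 < (stepB (b, a, z) c).2.1 → 0 < (stepB (b, a, z) c).2.2)) ∧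
    stepB (max (b - 1) 0, max (a - 1) 0, z) c =
      (max ((stepB (b, a, z) c).1 - 1) 0, max ((stepB (b, a, z) c).2.1 - 1) 0,
       (stepB (b, a, z) c).2.2) ∧
    (c ≠ '0' → (stepB (b, a, z) c).2.2 ≤ (stepB (b, a, z) c).2.1) := by
  by_cases h0 : c = '0'
  · simp [stepB, h0, Prod.mk.injEq]
    omega
  · by_cases h1 : c = '1'
    · have hza := hc h1
      by_cases hzp : 0 < z
      · simp [stepB, h0, h1, hzp, Prod.mk.injEq]
        omega
      · simp [stepB, h0, h1, hzp, Prod.mk.injEq]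
        omega
    · simp [stepB, h0, h1, Prod.mk.injEq]
      omega

-- the key invariant: one swap pass of A maps B's fold state (b,a,z) to
-- (max (b-1) 0, max (a-1) 0, z), pointwise along the list
theorem inv_pass (l : List Char) : ∀ b a z : Int, 0 ≤ b → 0 ≤ a → 0 ≤ z →
    (0 < a → 0 < z) → (l.head? = some '1' → z ≤ a) →
    (0 ≤ (l.foldl stepB (b, a, z)).1 ∧ 0 ≤ (l.foldl stepB (b, a, z)).2.1 ∧
     0 ≤ (l.foldl stepB (b, a, z)).2.2 ∧
     (0 < (l.foldl stepB (b, a, z)).2.1 → 0 < (l.foldl stepB (b, a, z)).2.2)) ∧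
    (innerA l).1.foldl stepB (max (b - 1) 0, max (a - 1) 0, z) =
      (max ((l.foldl stepB (b, a, z)).1 - 1) 0,
       max ((l.foldl stepB (b, a, z)).2.1 - 1) 0,
       (l.foldl stepB (b, a, z)).2.2) := by
  induction l using innerA.induct with
  | case1 =>
    intro b a z hb ha hz hinv _
    exact ⟨⟨hb, ha, hz, hinv⟩, by simp [innerA]⟩
  | case2 c =>
    intro b a z hb ha hz hinv hhead
    have hc : c = '1' → z ≤ a := by
      intro h1; exact hhead (by simp [h1])
    obtain ⟨hok, heq, _⟩ := step1 c b a z hb ha hz hinv hc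
    refine ⟨?_, ?_⟩
    · simpa [List.foldl_cons] using hok
    · simp only [innerA, List.foldl_cons, List.foldl_nil]
      exact heq
  | case3 c₁ c₂ t h ih =>
    obtain ⟨rfl, rfl⟩ := h
    intro b a z hb ha hz hinv _
    have s1 : stepB (b, a, z) '0' = (b, a, z + 1) := by simp [stepB]
    have s2 : stepB (b, a, z + 1) '1' = (b, max (a + 1) (z + 1), z + 1) := by
      simp [stepB, show (0:Int) < z + 1 by omega]
    have hia : (innerA ('0' :: '1' :: t)).1 = '1' :: '0' :: (innerA t).1 := by
      simp [innerA]
    -- primed side: process '1' then '0' from (max (b-1) 0, max (a-1) 0, z)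
    have p12 : stepB (stepB (max (b - 1) 0, max (a - 1) 0, z) '1') '0' =
        (max (b - 1) 0, max (max (a + 1) (z + 1) - 1) 0, z + 1) := by
      by_cases hzp : 0 < z
      · have e1 : stepB (max (b - 1) 0, max (a - 1) 0, z) '1' =
            (max (b - 1) 0, max (max (a - 1) 0 + 1) z, z) := by
          simp [stepB, hzp]
        rw [e1]
        simp [stepB, Prod.mk.injEq]
        omega
      · have ha0 : a = 0 := by omega
        have e1 : stepB (max (b - 1) 0, max (a - 1) 0, z) '1' =
            (max (b - 1) 0, max (a - 1) 0, z) := by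
          simp [stepB, hzp]
        rw [e1]
        simp [stepB, Prod.mk.injEq, ha0]
        omega
    have ihres := ih b (max (a + 1) (z + 1)) (z + 1) hb (by omega) (by omega)
      (by omega) (by intro _; omega)
    have hstart : (max (b - 1) 0, max (max (a + 1) (z + 1) - 1) 0, z + 1) =
        ((max (b - 1) 0 : Int), (max (max (a + 1) (z + 1) - 1) 0 : Int), (z + 1 : Int)) := rfl
    refine ⟨?_, ?_⟩
    · simpa [List.foldl_cons, s1, s2] using ihres.1
    · rw [hia]
      simp only [List.foldl_cons, s1, s2, p12]
      simpa [List.foldl_cons, s1, s2] using ihres.2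
  | case4 c₁ c₂ t h ih =>
    intro b a z hb ha hz hinv hhead
    have hc : c₁ = '1' → z ≤ a := by
      intro h1; exact hhead (by simp [h1])
    obtain ⟨hok, heq, hza⟩ := step1 c₁ b a z hb ha hz hinv hc
    have hia : (innerA (c₁ :: c₂ :: t)).1 = c₁ :: (innerA (c₂ :: t)).1 := by
      simp only [innerA, if_neg h]
    have hhead2 : (c₂ :: t).head? = some '1' →
        (stepB (b, a, z) c₁).2.2 ≤ (stepB (b, a, z) c₁).2.1 := by
      intro h2
      simp only [List.head?_cons, Option.some.injEq] at h2
      by_cases h0 : c₁ = '0'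
      · exact absurd ⟨h0, h2⟩ h
      · exact hza h0
    have ihres := ih (stepB (b, a, z) c₁).1 (stepB (b, a, z) c₁).2.1
      (stepB (b, a, z) c₁).2.2 hok.1 hok.2.1 hok.2.2.1 hok.2.2.2 hhead2
    refine ⟨?_, ?_⟩
    · simpa [List.foldl_cons] using ihres.1
    · rw [hia]
      simp only [List.foldl_cons, heq]
      simpa [List.foldl_cons] using ihres.2

-- outerA characterised by B's result
theorem outerA_eq (l : List Char) (rst : Int) :
    outerA l rst = rst + 1 + resB (0, 0, 0) l := by
  have H : ∀ n : Nat, ∀ l : List Char, muA l < n → ∀ rst : Int,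
      outerA l rst = rst + 1 + resB (0, 0, 0) l := by
    intro n
    induction n with
    | zero => intro l hl; exact absurd hl (by omega)
    | succ n ihn =>
      intro l hl rst
      rw [outerA]
      by_cases hs : (innerA l).2
      · simp only [hs, if_pos]
        have hfalse : has01 l = false := by
          have := innerA_sat l
          rw [hs] at this
          simpa using this.symm
        obtain ⟨z', hz'⟩ := resB_zero l hfalse 0 (by intro hzp; exact absurd hzp (by norm_num))
        simp [resB, hz']
      · simp only [hs]
        have htrue : has01 l = true := by
          have := innerA_sat l
          simp only [hs] at this
          simpa using this.symm
        have hpos := resB_pos l htrue 0 0 0 le_rfl le_rfl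
        have hinv := inv_pass l 0 0 0 le_rfl le_rfl le_rfl
          (by intro h; exact absurd h (by norm_num)) (by intro _; exact le_rfl)
        have hlt : muA (innerA l).1 < n := by
          have := muA_innerA_lt l (by simpa using hs)
          omega
        have hrec := ihn (innerA l).1 hlt (rst + 1)
        rw [dif_neg (by simp : ¬(false = true)), hrec]
        have hstart : ((max ((0:Int) - 1) 0, max ((0:Int) - 1) 0, (0:Int))) =
            ((0:Int), (0:Int), (0:Int)) := by norm_num
        have heq := hinv.2
        rw [hstart] at heq
        simp only [resB, heq] at *
        omega
  exact H (muA l + 1) l (by omega) rst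

-- ===== VERDICT (by name: the statement is the Claim_ definition above) =====
theorem secondsToRemoveOccurrences_spec : Claim_equal_secondsToRemoveOccurrences := by
  intro s _
  unfold Spec_secondsToRemoveOccurrences secondsToRemoveOccurrences
  show outerA s.toList 0 - 1 =
    max ((s.toList.foldl stepB (0, 0, 0)).1) ((s.toList.foldl stepB (0, 0, 0)).2.1)
  have h := outerA_eq s.toList 0
  simp only [resB] at h
  omega
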